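-- pv_equiv track=rewrite | github.com/JeongSae/Algorithm | programmers/Level1/부족한 금액 계산하기.py | solution
-- ===== SOURCE A (Python) =====
-- def solution(price, money, count):
--     result = 0
--     for i in range(1, count+1):
--         result += int(price*i)
--
--     if result > money:
--         return result - money
--     else:
--         return 0
-- ===== SOURCE B (Python) =====
-- def solution(price, money, count):
--     n = count if count > 0 else 0
--     total = price * n * (n + 1) // 2
--     return max(total - money, 0)
-- ===== Notes on version B (the rewrite author's own statement) =====
-- stated objective: faster
-- what changed: Replaced the O(count) accumulation loop with the closed-form arithmetic-series formula price*count*(count+1)//2 and a max with 0.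
import Mathlib
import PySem

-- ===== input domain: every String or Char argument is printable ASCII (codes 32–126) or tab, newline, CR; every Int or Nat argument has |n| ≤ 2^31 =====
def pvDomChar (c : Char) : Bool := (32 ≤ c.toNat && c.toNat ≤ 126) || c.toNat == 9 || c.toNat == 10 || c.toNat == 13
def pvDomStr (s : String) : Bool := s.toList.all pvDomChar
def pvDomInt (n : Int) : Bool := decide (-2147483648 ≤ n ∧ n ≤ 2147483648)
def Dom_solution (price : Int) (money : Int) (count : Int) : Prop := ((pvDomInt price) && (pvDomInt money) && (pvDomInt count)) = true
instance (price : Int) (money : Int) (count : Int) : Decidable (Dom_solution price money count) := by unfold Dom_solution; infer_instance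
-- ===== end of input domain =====

-- B replaces A's O(count) summation loop with the closed-form arithmetic-series formula (O(1)).


-- ===== PORT A =====
def solution (price : Int) (money : Int) (count : Int) : Int :=
  let result := (PySem.List.pyRange 1 (count + 1) 1).foldl (fun acc i => acc + price * i) 0
  if result > money then result - money else 0

-- ===== PORT B =====
def solution_alt (price : Int) (money : Int) (count : Int) : Int :=
  let n := if count > 0 then count else 0
  let total := PySem.Int.floordiv (price * n * (n + 1)) 2
  max (total - money) 0

-- ===== PRECONDITION & SPEC =====
def Spec_solution (price : Int) (money : Int) (count : Int) (out : Int) : Prop := out = solution_alt price money count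
instance (price : Int) (money : Int) (count : Int) (out : Int) : Decidable (Spec_solution price money count out) := by unfold Spec_solution; infer_instance

-- ===== CLAIM (what is proved, stated in full; the proofs are below) =====
def Claim_equal_solution : Prop := ∀ (price : Int) (money : Int) (count : Int), Dom_solution price money count → Spec_solution price money count (solution price money count)

-- ===== LEMMAS AND PROOFS =====
-- twice A's loop-sum equals price*n*(n+1)
theorem pv_sum_lemma (price : Int) (n : Nat) :
    2 * (PySem.List.pyRange 1 ((n : Int) + 1) 1).foldl (fun acc i => acc + price * i) 0
      = price * n * (n + 1) := by
  induction n with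
  | zero => simp
  | succ k ih =>
      have h : PySem.List.pyRange 1 ((k : Int) + 1 + 1) 1
          = PySem.List.pyRange 1 ((k : Int) + 1) 1 ++ [(k : Int) + 1] :=
        PySem.List.pyRange_one_succ_right (by omega)
      push_cast
      push_cast at ih
      rw [show ((k : Int) + 1 + 1) = ((k : Int) + 1) + 1 by ring, h, List.foldl_append]
      simp only [List.foldl_cons, List.foldl_nil]
      ring_nf
      ring_nf at ih
      omega

theorem pv_loop_closed (price : Int) (count : Int) :
    (PySem.List.pyRange 1 (count + 1) 1).foldl (fun acc i => acc + price * i) 0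
      = PySem.Int.floordiv (price * (if count > 0 then count else 0) * ((if count > 0 then count else 0) + 1)) 2 := by
  by_cases hc : count > 0
  · have hn : ((count.toNat : Int)) = count := Int.toNat_of_nonneg (by omega)
    have := pv_sum_lemma price count.toNat
    rw [hn] at this
    simp only [hc, if_pos]
    rw [show price * count * (count + 1) = 2 * ((PySem.List.pyRange 1 (count + 1) 1).foldl (fun acc i => acc + price * i) 0) from this.symm]
    simp [PySem.Int.floordiv, Int.mul_fdiv_cancel_left _ (by norm_num : (2:Int) ≠ 0)]
  · have : PySem.List.pyRange 1 (count + 1) 1 = [] :=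
      PySem.List.pyRange_one_eq_nil (by omega)
    simp [this, hc, PySem.Int.floordiv]

-- ===== VERDICT (by name: the statement is the Claim_ definition above) =====
theorem solution_spec : Claim_equal_solution := by
  intro price money count _
  unfold Spec_solution solution solution_alt
  simp only [pv_loop_closed price count]
  omega
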